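-- pv_equiv track=rewrite | github.com/eliottcassidy2000/math | 04-computation/det_m_cycle_connection.py | independence_polynomial_coeffs
-- ===== SOURCE A (Python) =====
-- def independence_polynomial_coeffs(cycles):
--     """Compute alpha_k = number of independent sets of size k."""
--     cycle_list = list(cycles)
--     m = len(cycle_list)
--     coeffs = [0] * (m + 1)
--     for mask in range(1 << m):
--         subset = [cycle_list[k] for k in range(m) if mask & (1 << k)]
--         independent = True
--         vertices = set()
--         for c in subset:
--             if vertices & c:
--                 independent = False
--                 break
--             vertices |= c
--         if independent:
--             coeffs[len(subset)] += 1
--     return coeffs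
-- ===== SOURCE B (Python) =====
-- def independence_polynomial_coeffs(cycles):
--     """Compute alpha_k = number of independent sets of size k (pruned DFS instead of 2^m masks)."""
--     cycle_list = list(cycles)
--     m = len(cycle_list)
--     coeffs = [0] * (m + 1)
--
--     def dfs(i, used, size):
--         if i == m:
--             coeffs[size] += 1
--             return
--         dfs(i + 1, used, size)
--         c = set(cycle_list[i])
--         if used.isdisjoint(c):
--             dfs(i + 1, used | c, size + 1)
--
--     dfs(0, set(), 0)
--     return coeffs
-- ===== Notes on version B (the rewrite author's own statement) =====
-- stated objective: faster
-- what changed: Replaced the 2^m bitmask enumeration of all subsets (each re-checked from scratch) by a recursive DFS over the cycle list that carries the accumulated vertex set and current size, so branches whose next cycle conflicts with the used vertices are pruned and only independent sets are visited.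
import Mathlib
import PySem

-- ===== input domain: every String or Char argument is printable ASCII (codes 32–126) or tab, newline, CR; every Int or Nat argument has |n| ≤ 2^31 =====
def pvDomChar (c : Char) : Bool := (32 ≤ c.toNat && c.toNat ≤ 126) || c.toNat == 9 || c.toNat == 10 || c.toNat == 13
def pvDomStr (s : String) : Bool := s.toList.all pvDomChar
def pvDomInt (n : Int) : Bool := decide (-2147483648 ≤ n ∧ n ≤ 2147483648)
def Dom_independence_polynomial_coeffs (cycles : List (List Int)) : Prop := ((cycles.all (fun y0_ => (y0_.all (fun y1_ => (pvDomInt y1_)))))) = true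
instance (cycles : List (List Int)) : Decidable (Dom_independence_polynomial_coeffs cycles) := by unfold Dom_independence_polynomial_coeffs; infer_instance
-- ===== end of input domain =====

-- B replaces A's 2^m bitmask enumeration of all subsets by a pruned DFS over the cycle
-- list that carries the set of used vertices and the current size, visiting only
-- independent sets (objective: faster; inner lists represent Python sets of vertices).

-- ===== PORT A =====
-- the inner 'for c in subset: if vertices & c: … break / vertices |= c' loop (break = stop recursing)
def pvACheck : List (List Int) → PySem.Set Int → Bool
  | [], _ => true
  | c :: rest, vertices =>
    if PySem.Set.inter vertices c ≠ [] then false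
    else pvACheck rest (PySem.Set.union vertices c)

def independence_polynomial_coeffs (cycles : List (List Int)) : List Int :=
  let cycle_list := cycles
  let m := cycle_list.length
  let coeffs : List Int := List.replicate (m + 1) 0
  (PySem.List.pyRange 0 ((2 ^ m : Nat) : Int) 1).foldl
    (fun coeffs mask =>
      -- 'mask & (1 << k)' ported as Nat.testBit mask.toNat k.toNat: exact, since mask, k ≥ 0 here
      let subset := ((PySem.List.pyRange 0 (m : Int) 1).filter
          (fun k => Nat.testBit mask.toNat k.toNat)).map
          (fun k => PySem.List.pyGetD cycle_list k [])
      if pvACheck subset PySem.Set.empty then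
        PySem.List.pySetD coeffs (subset.length : Int)
          (PySem.List.pyGetD coeffs (subset.length : Int) 0 + 1)
      else coeffs)
    coeffs

-- ===== PORT B =====
-- dfs(i, used, size) of Source B, recursing over the remaining slice of cycle_list
def pvDfs (used : PySem.Set Int) (size : Int) (coeffs : List Int) :
    List (List Int) → List Int
  | [] => PySem.List.pySetD coeffs size (PySem.List.pyGetD coeffs size 0 + 1)
  | c :: rest =>
    let coeffs1 := pvDfs used size coeffs rest
    let cs := PySem.Set.ofList c
    if PySem.Set.isdisjoint used cs then
      pvDfs (PySem.Set.union used cs) (size + 1) coeffs1 rest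
    else coeffs1

def independence_polynomial_coeffs_alt (cycles : List (List Int)) : List Int :=
  pvDfs PySem.Set.empty 0 (List.replicate (cycles.length + 1) 0) cycles

-- ===== PRECONDITION & SPEC =====
def Spec_independence_polynomial_coeffs (cycles : List (List Int)) (out : List Int) : Prop :=
  out = independence_polynomial_coeffs_alt cycles
instance (cycles : List (List Int)) (out : List Int) :
    Decidable (Spec_independence_polynomial_coeffs cycles out) := by
  unfold Spec_independence_polynomial_coeffs; infer_instance

-- ===== CLAIM =====
def Claim_equal_independence_polynomial_coeffs : Prop :=
  ∀ (cycles : List (List Int)), Dom_independence_polynomial_coeffs cycles →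
    Spec_independence_polynomial_coeffs cycles (independence_polynomial_coeffs cycles)

-- ===== LEMMAS AND PROOFS =====

-- coeffs[j] += 1 (the single coeffs update both programs perform)
def pvIncr (cs : List Int) (j : Int) : List Int :=
  PySem.List.pySetD cs j (PySem.List.pyGetD cs j 0 + 1)

-- the sub-list of cl selected by the bits of mask (low bit = head)
def pvSel : Nat → List (List Int) → List (List Int)
  | _, [] => []
  | mask, c :: rest => (if mask % 2 = 1 then [c] else []) ++ pvSel (mask / 2) rest

-- the sizes (offset by `size`) of the independent subsets of cl given used vertices,
-- in B's DFS visiting order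
def pvSizes : List (List Int) → PySem.Set Int → Int → List Int
  | [], _, size => [size]
  | c :: rest, used, size =>
    pvSizes rest used size ++
      (if PySem.Set.isdisjoint used (PySem.Set.ofList c) then
        pvSizes rest (PySem.Set.union used (PySem.Set.ofList c)) (size + 1)
      else [])

theorem pvDfs_eq_foldl (cl : List (List Int)) (used : PySem.Set Int) (size : Int)
    (coeffs : List Int) :
    pvDfs used size coeffs cl = (pvSizes cl used size).foldl pvIncr coeffs := by
  induction cl generalizing used size coeffs with
  | nil => rfl
  | cons c rest ih =>
    simp only [pvDfs, pvSizes, List.foldl_append]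
    split
    · rw [ih, ih]
    · rw [ih]; rfl

theorem pvIdx_lt (n : Nat) (j : Int) (p : Nat) (h : PySem.List.pyIdx? n j = some p) :
    p < n := by
  unfold PySem.List.pyIdx? at h
  split_ifs at h <;> simp_all <;> omega

theorem pvIncr_resolved (cs : List Int) (j : Int) :
    pvIncr cs j = match PySem.List.pyIdx? cs.length j with
      | none => cs
      | some p => cs.set p (cs.getD p 0 + 1) := by
  unfold pvIncr PySem.List.pySetD PySem.List.pySet? PySem.List.pyGetD PySem.List.pyGet?
  cases h : PySem.List.pyIdx? cs.length j with
  | none => simp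
  | some p =>
    have hlt := pvIdx_lt cs.length j p h
    simp [List.getD, List.getElem?_eq_getElem hlt]

theorem pvIncr_comm (cs : List Int) (j j' : Int) :
    pvIncr (pvIncr cs j) j' = pvIncr (pvIncr cs j') j := by
  have hlen : ∀ (u : List Int) (i : Int), (pvIncr u i).length = u.length := by
    intro u i
    rw [pvIncr_resolved]
    cases PySem.List.pyIdx? u.length i <;> simp
  cases h : PySem.List.pyIdx? cs.length j with
  | none =>
    rw [pvIncr_resolved cs j, h]
    rw [pvIncr_resolved (pvIncr cs j') j, hlen, h]
  | some p =>
    cases h' : PySem.List.pyIdx? cs.length j' with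
    | none =>
      rw [pvIncr_resolved cs j', h', pvIncr_resolved (pvIncr cs j) j', hlen, h']
    | some q =>
      have hp := pvIdx_lt cs.length j p h
      have hq := pvIdx_lt cs.length j' q h'
      rw [pvIncr_resolved cs j, h, pvIncr_resolved cs j', h',
        pvIncr_resolved _ j', pvIncr_resolved _ j]
      simp only [List.length_set, h, h']
      by_cases hpq : p = q
      · subst hpq
        simp [List.getD, List.length_set, hp, List.getElem_set_self]
      · have hqp : q ≠ p := fun e => hpq e.symm
        simp only [List.getD, List.getElem?_set_ne hpq, List.getElem?_set_ne hqp]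
        exact List.set_comm _ _ hpq

theorem pvFoldl_if_filter (L : List Nat) (p : Nat → Bool) (f : Nat → Int) (cs : List Int) :
    L.foldl (fun cs x => if p x then pvIncr cs (f x) else cs) cs
      = ((L.filter p).map f).foldl pvIncr cs := by
  induction L generalizing cs with
  | nil => rfl
  | cons x L ih =>
    simp only [List.foldl_cons, List.filter_cons]
    by_cases h : p x <;> simp [h, ih]

theorem pvFoldl_add_filter (u : List Int) (s : PySem.Set Int) (x : Int) (hx : x ∈ s) :
    ((u.filter (fun y => !y == x)).foldl PySem.Set.add s) = u.foldl PySem.Set.add s := by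
  induction u generalizing s with
  | nil => rfl
  | cons y u ih =>
    by_cases h : y = x
    · subst h
      have : (y :: u).filter (fun z => !z == y) = u.filter (fun z => !z == y) := by
        simp
      rw [this, ih s hx, List.foldl_cons, PySem.Set.add_of_mem hx]
    · have : (y :: u).filter (fun z => !z == x) = y :: u.filter (fun z => !z == x) := by
        simp [h]
      rw [this, List.foldl_cons, List.foldl_cons]
      exact ih (PySem.Set.add s y) ((PySem.Set.mem_add s y x).mpr (Or.inl hx))

theorem pvUnion_ofList (s : PySem.Set Int) (t : List Int) :
    PySem.Set.union s (PySem.Set.ofList t) = PySem.Set.union s t := by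
  show (PySem.Set.ofList t).foldl PySem.Set.add s = t.foldl PySem.Set.add s
  induction t generalizing s with
  | nil => rfl
  | cons x t ih =>
    rw [PySem.Set.ofList_cons]
    simp only [List.foldl_cons]
    rw [← ih (PySem.Set.add s x)]
    exact pvFoldl_add_filter (PySem.Set.ofList t) (PySem.Set.add s x) x
      (by simp [PySem.Set.mem_add])

theorem pvInter_nil_iff (s : PySem.Set Int) (t : List Int) :
    (PySem.Set.inter s t = []) ↔ PySem.Set.isdisjoint s (PySem.Set.ofList t) = true := by
  rw [PySem.Set.isdisjoint_iff]
  simp [PySem.Set.inter, List.filter_eq_nil_iff, PySem.Set.mem_ofList]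

theorem pvRange_two_pow_perm (n : Nat) :
    (List.range (2 ^ (n + 1))).Perm
      ((List.range (2 ^ n)).map (fun k => 2 * k)
        ++ (List.range (2 ^ n)).map (fun k => 2 * k + 1)) := by
  apply (List.perm_ext_iff_of_nodup (List.nodup_range) ?_).mpr
  · intro a
    simp only [List.mem_range, List.mem_append, List.mem_map]
    constructor
    · intro h
      rcases Nat.even_or_odd a with ⟨k, hk⟩ | ⟨k, hk⟩
      · exact Or.inl ⟨k, by omega, by omega⟩
      · exact Or.inr ⟨k, by omega, by omega⟩
    · rintro (⟨k, hk, rfl⟩ | ⟨k, hk, rfl⟩) <;> omega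
  · apply List.Nodup.append
    · exact List.nodup_range.map (fun a b h => by omega)
    · exact List.nodup_range.map (fun a b h => by omega)
    · intro a ha hb
      simp only [List.mem_map, List.mem_range] at ha hb
      omega

theorem pvPerm (cl : List (List Int)) (used : PySem.Set Int) (size : Int) :
    (((List.range (2 ^ cl.length)).filter
        (fun mask => pvACheck (pvSel mask cl) used)).map
        (fun mask => size + ((pvSel mask cl).length : Int))).Perm
      (pvSizes cl used size) := by
  induction cl generalizing used size with
  | nil =>
    simp [pvSel, pvACheck, pvSizes]
  | cons c rest ih =>
    have hsel0 : ∀ k : Nat, pvSel (2 * k) (c :: rest) = pvSel k rest := by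
      intro k
      simp [pvSel, Nat.mul_mod_right, Nat.mul_div_cancel_left _ (by norm_num : (0:Nat) < 2)]
    have hsel1 : ∀ k : Nat, pvSel (2 * k + 1) (c :: rest) = c :: pvSel k rest := by
      intro k
      have h1 : (2 * k + 1) % 2 = 1 := by omega
      have h2 : (2 * k + 1) / 2 = k := by omega
      simp [pvSel, h1, h2]
    have hperm := (pvRange_two_pow_perm rest.length).filter
        (fun mask => pvACheck (pvSel mask (c :: rest)) used)
    have hperm2 := hperm.map (fun mask => size + ((pvSel mask (c :: rest)).length : Int))
    simp only [List.length_cons]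
    refine hperm2.trans ?_
    rw [List.filter_append, List.map_append]
    simp only [List.filter_map, List.map_map]
    unfold pvSizes
    refine List.Perm.append ?_ ?_
    · -- even masks: c excluded
      have he : ∀ k : Nat,
          ((fun mask => pvACheck (pvSel mask (c :: rest)) used) ∘ fun k => 2 * k) k
            = pvACheck (pvSel k rest) used := by
        intro k; simp [hsel0]
      rw [List.filter_congr (fun k _ => he k)]
      have hf : ∀ k : Nat, ((fun mask => size + ((pvSel mask (c :: rest)).length : Int)) ∘
          fun k => 2 * k) k = size + ((pvSel k rest).length : Int) := by
        intro k; simp [hsel0]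
      rw [List.map_congr_left (fun k _ => hf k)]
      exact ih used size
    · -- odd masks: c included
      by_cases hd : PySem.Set.isdisjoint used (PySem.Set.ofList c) = true
      · have hint : PySem.Set.inter used c = [] := (pvInter_nil_iff _ _).mpr hd
        have hcheck : ∀ w, pvACheck (c :: w) used = pvACheck w (PySem.Set.union used (PySem.Set.ofList c)) := by
          intro w
          simp [pvACheck, hint, pvUnion_ofList]
        have ho : ∀ k : Nat,
            ((fun mask => pvACheck (pvSel mask (c :: rest)) used) ∘ fun k => 2 * k + 1) k
              = pvACheck (pvSel k rest) (PySem.Set.union used (PySem.Set.ofList c)) := by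
          intro k; simp [hsel1, hcheck]
        rw [List.filter_congr (fun k _ => ho k)]
        have hf : ∀ k : Nat, ((fun mask => size + ((pvSel mask (c :: rest)).length : Int)) ∘
            fun k => 2 * k + 1) k = (size + 1) + ((pvSel k rest).length : Int) := by
          intro k
          simp only [Function.comp_apply, hsel1, List.length_cons]
          push_cast
          ring
        rw [List.map_congr_left (fun k _ => hf k)]
        rw [if_pos hd]
        exact ih (PySem.Set.union used (PySem.Set.ofList c)) (size + 1)
      · have hint : PySem.Set.inter used c ≠ [] := by
          intro h
          exact hd ((pvInter_nil_iff _ _).mp h)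
        have hcheck : ∀ w, pvACheck (c :: w) used = false := by
          intro w; simp [pvACheck, hint]
        have hnil : (List.range (2 ^ rest.length)).filter
            ((fun mask => pvACheck (pvSel mask (c :: rest)) used) ∘ fun k => 2 * k + 1) = [] := by
          rw [List.filter_eq_nil_iff]
          intro a _
          simp [hsel1, hcheck]
        rw [hnil, if_neg hd]
        simp

theorem pvSel_eq (cl : List (List Int)) (k : Nat) :
    ((List.range cl.length).filter (fun j => Nat.testBit k j)).map
      (fun j => cl.getD j ([] : List Int)) = pvSel k cl := by
  induction cl generalizing k with
  | nil => rfl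
  | cons c rest ih =>
    have hp : ((fun j => Nat.testBit k j) ∘ Nat.succ) = (fun j => Nat.testBit (k / 2) j) :=
      funext fun j => Nat.testBit_succ k j
    have hf : ((fun j => (c :: rest).getD j ([] : List Int)) ∘ Nat.succ)
        = (fun j => rest.getD j ([] : List Int)) :=
      funext fun j => List.getD_cons_succ
    have key : (((List.range rest.length).map Nat.succ).filter (fun j => Nat.testBit k j)).map
        (fun j => (c :: rest).getD j ([] : List Int)) = pvSel (k / 2) rest := by
      rw [List.filter_map, List.map_map, hp, hf, ih]
    rw [List.length_cons, List.range_succ_eq_map, List.filter_cons, Nat.testBit_zero]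
    by_cases h : k % 2 = 1
    · rw [if_pos (by simp [h]), List.map_cons, key]
      simp [pvSel, h]
    · rw [if_neg (by simp [h]), key]
      simp [pvSel, h]

theorem pvA_reduce (cycles : List (List Int)) :
    independence_polynomial_coeffs cycles
      = (((List.range (2 ^ cycles.length)).filter
            (fun k => pvACheck (pvSel k cycles) [])).map
            (fun k => ((pvSel k cycles).length : Int))).foldl pvIncr
          (List.replicate (cycles.length + 1) 0) := by
  have hsub : ∀ k : Nat,
      ((PySem.List.pyRange 0 (cycles.length : Int) 1).filter
          (fun i => Nat.testBit ((k : Int)).toNat i.toNat)).map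
        (fun i => PySem.List.pyGetD cycles i []) = pvSel k cycles := by
    intro k
    rw [PySem.List.pyRange_one, List.filter_map, List.map_map]
    have h1 : ((fun i => Nat.testBit ((k : Int)).toNat i.toNat) ∘ fun j : Nat => (0 : Int) + j)
        = fun j : Nat => Nat.testBit k j := by
      funext j; simp
    have h2 : ((fun i => PySem.List.pyGetD cycles i ([] : List Int)) ∘ fun j : Nat => (0 : Int) + j)
        = fun j : Nat => cycles.getD j ([] : List Int) := by
      funext j; simp [PySem.List.pyGetD_natCast]
    have h3 : ((cycles.length : Int) - 0).toNat = cycles.length := by simp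
    rw [h1, h2, h3, pvSel_eq]
  unfold independence_polynomial_coeffs
  dsimp only
  rw [PySem.List.foldl_congr_mem _ _
      (fun coeffs (mask : Int) =>
        if pvACheck (pvSel mask.toNat cycles) [] then
          pvIncr coeffs ((pvSel mask.toNat cycles).length : Int)
        else coeffs) _ ?_]
  · rw [PySem.List.pyRange_one, List.foldl_map]
    have h4 : (((2 ^ cycles.length : Nat) : Int) - 0).toNat = 2 ^ cycles.length := by
      rw [Int.sub_zero, Int.toNat_natCast]
    rw [h4]
    rw [PySem.List.foldl_congr_mem _ _
        (fun coeffs (k : Nat) =>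
          if pvACheck (pvSel k cycles) [] then pvIncr coeffs ((pvSel k cycles).length : Int)
          else coeffs) _ (by intro acc k _; simp)]
    exact pvFoldl_if_filter _ _ _ _
  · intro acc mask _
    have h := hsub mask.toNat
    simp only [Int.toNat_natCast] at h
    rw [h]
    rfl

-- ===== VERDICT =====
theorem independence_polynomial_coeffs_spec : Claim_equal_independence_polynomial_coeffs := by
  intro cycles _
  unfold Spec_independence_polynomial_coeffs independence_polynomial_coeffs_alt
  rw [pvA_reduce, pvDfs_eq_foldl]
  have hperm := pvPerm cycles PySem.Set.empty 0
  simp only [zero_add, PySem.Set.empty] at hperm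
  exact hperm.foldl_eq' (fun x _ y _ z => pvIncr_comm z x y) _
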